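-- pv_equiv track=rewrite | github.com/rayquezia03/NOTES_APC | activities_icc/conceito_aluno.py | reavaliacao
-- ===== SOURCE A (Python) =====
-- def reavaliacao(notas,reavaliacao_nota):
--
--     menor_nota = notas[0]
--     for nota in notas:
--         #verificação da menor nota
--         if nota < menor_nota:
--             menor_nota = nota
--
--     #fluxo de substituição da menor nota:
--     index_subs_nota = notas.index(menor_nota)
--
--     #antes de subst. verifico se a nota da reavaliação foi maior que a menor nota
--     if reavaliacao_nota >= menor_nota:
--         notas[index_subs_nota] = reavaliacao_nota
--
--     return notas
-- ===== SOURCE B (Python) =====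
-- def reavaliacao(notas, reavaliacao_nota):
--     # Sort (grade, position) pairs: the lexicographically smallest pair is the
--     # smallest grade at its first position (tuple order breaks ties by index).
--     menor_nota, i = sorted((nota, j) for j, nota in enumerate(notas))[0]
--     if reavaliacao_nota >= menor_nota:
--         notas[i] = reavaliacao_nota
--     return notas
-- ===== Notes on version B (the rewrite author's own statement) =====
-- stated objective: alternative
-- what changed: B selects the replacement target by sorting (grade, position) pairs and taking the lexicographically smallest one (tuple order gives the first occurrence of the minimum), replacing A's manual min loop plus .index rescan.
-- outside the precondition, e.g. on reavaliacao([], 5): A raises IndexError, B raises IndexError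
import Mathlib
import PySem

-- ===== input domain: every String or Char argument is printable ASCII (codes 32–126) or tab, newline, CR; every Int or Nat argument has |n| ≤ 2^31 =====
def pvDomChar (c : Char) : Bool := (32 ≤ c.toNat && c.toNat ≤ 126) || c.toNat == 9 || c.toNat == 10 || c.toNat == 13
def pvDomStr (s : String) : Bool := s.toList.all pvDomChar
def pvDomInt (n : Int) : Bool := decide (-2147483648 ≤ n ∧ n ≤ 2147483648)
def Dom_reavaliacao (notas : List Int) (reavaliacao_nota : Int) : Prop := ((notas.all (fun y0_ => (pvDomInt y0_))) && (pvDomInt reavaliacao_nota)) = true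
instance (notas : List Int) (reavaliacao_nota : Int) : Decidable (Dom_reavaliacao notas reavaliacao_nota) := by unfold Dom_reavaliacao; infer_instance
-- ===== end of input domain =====

-- B replaces A's min loop + .index rescan by sorting (grade, position) pairs and
-- taking the lexicographically smallest pair (objective: alternative, not a speed change).
-- Both Pythons mutate `notas` in place to the same final contents; the theorems
-- are about the returned list (in both programs the same mutated object).

-- ===== PORT A =====
-- A's loop body: menor_nota = nota if nota < menor_nota
def stepMin (m n : Int) : Int := if n < m then n else m

def reavaliacao (notas : List Int) (reavaliacao_nota : Int) : List Int :=
  -- notas[0] raises IndexError on []: excluded by Pre_reavaliacao (headD's default unreachable there)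
  let menor := notas.foldl stepMin (notas.headD 0)
  let idx := (PySem.List.index? notas menor).getD 0
  if reavaliacao_nota ≥ menor then notas.set idx reavaliacao_nota else notas

-- ===== PORT B =====
def reavaliacao_alt (notas : List Int) (reavaliacao_nota : Int) : List Int :=
  let pairs := (PySem.List.enumerate notas 0).map (fun p => (p.2, p.1))
  let s := PySem.List.sorted2 pairs (fun p => p.1) (fun p => p.2) false
  -- sorted(...)[0] raises IndexError on []: excluded by Pre_reavaliacao (the getD default is unreachable there)
  let hd := (PySem.List.pyGet? s 0).getD (0, 0)
  if reavaliacao_nota ≥ hd.1 then notas.set hd.2.toNat reavaliacao_nota else notas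

-- ===== PRECONDITION & SPEC =====
-- Pre_ excludes only the empty list, on which Python A (and B) raise IndexError.
def Pre_reavaliacao (notas : List Int) (_reavaliacao_nota : Int) : Prop := notas ≠ []
instance (notas : List Int) (reavaliacao_nota : Int) : Decidable (Pre_reavaliacao notas reavaliacao_nota) := by unfold Pre_reavaliacao; infer_instance
def pvWitness_reavaliacao : List Int × Int := ([7, 3, 9], 5)

def Spec_reavaliacao (notas : List Int) (reavaliacao_nota : Int) (out : List Int) : Prop := out = reavaliacao_alt notas reavaliacao_nota
instance (notas : List Int) (reavaliacao_nota : Int) (out : List Int) : Decidable (Spec_reavaliacao notas reavaliacao_nota out) := by unfold Spec_reavaliacao; infer_instance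

-- ===== CLAIM (what is proved, stated in full; the proofs are below) =====
def Claim_equal_reavaliacao : Prop := ∀ (notas : List Int) (reavaliacao_nota : Int), Dom_reavaliacao notas reavaliacao_nota → Pre_reavaliacao notas reavaliacao_nota → Spec_reavaliacao notas reavaliacao_nota (reavaliacao notas reavaliacao_nota)

-- ===== LEMMAS AND PROOFS =====

-- Python's tuple '<' on (grade, position) pairs, as sorted2 compares them
def lexLt (a b : Int × Int) : Bool :=
  decide (a.1 < b.1) || (!decide (b.1 < a.1) && decide (a.2 < b.2))

-- the head of an insertion sort is the running lex-minimum of the inserted elements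
theorem foldl_insertBy_head (t : List (Int × Int)) (y : Int × Int) (acc : List (Int × Int)) :
    ∃ rest, t.foldl (fun a x => PySem.List.insertBy lexLt x a) (y :: acc) =
      (t.foldl (fun h x => if lexLt x h then x else h) y) :: rest := by
  induction t generalizing y acc with
  | nil => exact ⟨acc, rfl⟩
  | cons c t ih =>
    simp only [List.foldl_cons]
    by_cases hc : lexLt c y = true
    · have : PySem.List.insertBy lexLt c (y :: acc) = c :: y :: acc := by
        simp [PySem.List.insertBy, hc]
      rw [this]
      simpa [hc] using ih c (y :: acc)
    · have : PySem.List.insertBy lexLt c (y :: acc) = y :: PySem.List.insertBy lexLt c acc := by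
        simp [PySem.List.insertBy, hc]
      rw [this]
      simpa [hc] using ih y (PySem.List.insertBy lexLt c acc)

theorem foldMin_le (t : List Int) (m : Int) : t.foldl stepMin m ≤ m := by
  induction t generalizing m with
  | nil => simp
  | cons c t ih =>
    simp only [List.foldl_cons]
    calc t.foldl stepMin (stepMin m c) ≤ stepMin m c := ih _
      _ ≤ m := by unfold stepMin; split <;> omega

theorem foldMin_mem (t : List Int) (m : Int) (h : t.foldl stepMin m ≠ m) :
    t.foldl stepMin m ∈ t := by
  induction t generalizing m with
  | nil => simp at h
  | cons c t ih =>
    simp only [List.foldl_cons] at h ⊢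
    by_cases hc : c < m
    · have hsc : stepMin m c = c := by simp [stepMin, hc]
      rw [hsc] at h ⊢
      by_cases he : t.foldl stepMin c = c
      · simp [he]
      · exact List.mem_cons_of_mem _ (ih c he)
    · have hsc : stepMin m c = m := by simp [stepMin, hc]
      rw [hsc] at h ⊢
      exact List.mem_cons_of_mem _ (ih m h)

-- the lex-min fold over the swapped enumerate pairs computes A's minimum together
-- with (k + the first index of that minimum in t) when it improves on m, else i
theorem foldMinIdx_key (t : List Int) (m i k : Int) (hik : i < k) :
    ((PySem.List.enumerate t k).map (fun p => (p.2, p.1))).foldl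
        (fun h x => if lexLt x h then x else h) (m, i) =
      (t.foldl stepMin m,
       if t.foldl stepMin m < m then
         k + ((PySem.List.index? t (t.foldl stepMin m)).getD 0 : Int)
       else i) := by
  induction t generalizing m i k with
  | nil => simp [PySem.List.enumerate_nil]
  | cons c t ih =>
    simp only [PySem.List.enumerate_cons, List.map_cons, List.foldl_cons]
    by_cases hc : c < m
    · have hs : (if lexLt (c, k) (m, i) then (c, k) else (m, i)) = (c, k) := by
        simp [lexLt, hc]
      have hsm : stepMin m c = c := by simp [stepMin, hc]
      rw [hs, ih c k (k + 1) (by omega), hsm]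
      set M := t.foldl stepMin c with hM
      have hle : M ≤ c := foldMin_le t c
      have hlt : M < m := lt_of_le_of_lt hle hc
      by_cases h2 : M < c
      · have hne : c ≠ M := by omega
        have hmem : M ∈ t := foldMin_mem t c (by omega)
        obtain ⟨j, hj⟩ := (PySem.List.index?_isSome_iff t M).mpr hmem |> Option.isSome_iff_exists.mp
        rw [PySem.List.index?_cons_of_ne t hne, hj]
        simp [h2, hlt]
        ring
      · have heq : M = c := le_antisymm hle (by omega)
        rw [heq, PySem.List.index?_cons_self]
        simp [hc]
    · have hs : (if lexLt (c, k) (m, i) then (c, k) else (m, i)) = (m, i) := by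
        have : ¬ (k < i) := by omega
        simp [lexLt, hc, this]
      have hsm : stepMin m c = m := by simp [stepMin, hc]
      rw [hs, ih m i (k + 1) (by omega), hsm]
      set M := t.foldl stepMin m with hM
      by_cases h2 : M < m
      · have hne : c ≠ M := by have := not_lt.mp hc; omega
        have hmem : M ∈ t := foldMin_mem t m (by omega)
        obtain ⟨j, hj⟩ := (PySem.List.index?_isSome_iff t M).mpr hmem |> Option.isSome_iff_exists.mp
        rw [PySem.List.index?_cons_of_ne t hne, hj]
        simp [h2]
        ring
      · simp [h2]

-- ===== VERDICT (by name: the statement is the Claim_ definition above) =====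
theorem reavaliacao_spec : Claim_equal_reavaliacao := by
  intro notas r _ hpre
  unfold Spec_reavaliacao
  match notas with
  | [] => exact absurd rfl hpre
  | h :: t =>
    unfold reavaliacao reavaliacao_alt
    simp only [List.headD, PySem.List.enumerate_cons, List.map_cons, List.foldl_cons, zero_add]
    -- B's sort: sorted2 is an insertion-sort fold with exactly the comparison lexLt
    have hsort : PySem.List.sorted2 (((h, 0) : Int × Int) ::
          (PySem.List.enumerate t 1).map (fun p => (p.2, p.1)))
          (fun p => p.1) (fun p => p.2) false =
        ((PySem.List.enumerate t 1).map (fun p => (p.2, p.1))).foldl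
          (fun a x => PySem.List.insertBy lexLt x a) [(h, 0)] := rfl
    rw [hsort]
    obtain ⟨rest, hrest⟩ := foldl_insertBy_head
      ((PySem.List.enumerate t 1).map (fun p => (p.2, p.1))) (h, 0) []
    rw [hrest, foldMinIdx_key t h 0 1 (by omega)]
    have hget : ∀ (p : Int × Int) (l : List (Int × Int)),
        (PySem.List.pyGet? (p :: l) 0).getD (0, 0) = p := by
      intro p l; simp [PySem.List.pyGet?, PySem.List.pyIdx?]
    rw [hget]
    have hstepA : stepMin h h = h := by simp [stepMin]
    rw [hstepA]
    set M := t.foldl stepMin h with hM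
    have hle : M ≤ h := foldMin_le t h
    by_cases h2 : M < h
    · have hne : h ≠ M := by omega
      have hmem : M ∈ t := foldMin_mem t h (by omega)
      obtain ⟨j, hj⟩ := (PySem.List.index?_isSome_iff t M).mpr hmem |> Option.isSome_iff_exists.mp
      rw [PySem.List.index?_cons_of_ne t hne, hj]
      have h1 : ((1 : Int) + (j : Int)).toNat = j + 1 := by omega
      simp [h2, h1]
    · have heq : M = h := le_antisymm hle (by omega)
      rw [heq, PySem.List.index?_cons_self]
      simp
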